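-- pv_equiv track=rewrite | github.com/StefanPej/advent_of_code | 2025/day_04/part_2.py | scan_around
-- ===== SOURCE A (Python) =====
-- def scan_around(row, col, grid):
--
--     row = int(row)
--     col = int(col)
--
--     max_rows = len(grid)-1
--     max_cols = len(grid[0])-1
--
--     around = [(row + nr, col + nc) for nr in range(-1,2,1) for nc in range(-1,2,1)]
--
--     count = 0
--     for nr, nc in around:
--         if (nr == row and nc == col) or (nc < 0) or (nc > max_cols) or (nr < 0) or (nr > max_rows):
--             continue
--         if grid[nr][nc] == "@":
--             count +=1
--
--     return count < 4
-- ===== SOURCE B (Python) =====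
-- def scan_around(row, col, grid):
--     row = int(row)
--     col = int(col)
--     rows = len(grid)
--     cols = len(grid[0])
--     r0, r1 = max(0, row - 1), min(rows - 1, row + 1)
--     c0, c1 = max(0, col - 1), min(cols - 1, col + 1)
--     total = 0
--     if c0 <= c1:
--         for ri in range(r0, r1 + 1):
--             total += grid[ri][c0:c1 + 1].count("@")
--     if 0 <= row < rows and 0 <= col < cols and grid[row][col] == "@":
--         total -= 1
--     return total < 4
-- ===== Notes on version B (the rewrite author's own statement) =====
-- stated objective: simpler
-- what changed: B replaces A's 9-element offset-pair comprehension with per-cell center/bounds tests by counting '@' directly in clamped row slices of the 3x3 window and subtracting the center cell once.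
-- outside the precondition, e.g. on scan_around(1, 0, [['.'], [], ['.']]): A returns True, B raises IndexError
import Mathlib
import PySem

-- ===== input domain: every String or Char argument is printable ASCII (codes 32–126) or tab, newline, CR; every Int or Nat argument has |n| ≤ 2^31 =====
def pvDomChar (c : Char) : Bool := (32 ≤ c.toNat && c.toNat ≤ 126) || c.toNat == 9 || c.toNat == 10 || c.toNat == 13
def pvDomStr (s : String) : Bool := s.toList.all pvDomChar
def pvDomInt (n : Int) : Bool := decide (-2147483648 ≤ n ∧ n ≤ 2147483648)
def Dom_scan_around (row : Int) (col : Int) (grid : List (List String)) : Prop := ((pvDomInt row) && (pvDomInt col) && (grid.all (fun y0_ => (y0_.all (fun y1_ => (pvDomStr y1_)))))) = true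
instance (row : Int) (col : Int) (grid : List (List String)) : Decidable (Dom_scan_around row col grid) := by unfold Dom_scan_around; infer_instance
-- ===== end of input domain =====

-- B replaces A's 9-offset neighbor scan with per-cell bounds checks by counting "@" in clamped
-- row slices and subtracting the center cell (objective: simpler decomposition; return value only).


-- ===== PORT A =====
-- literal port of A; grid[nr][nc] is read with pyGetD, exact on Pre_ (the indices read are in range there)
def scan_around (row : Int) (col : Int) (grid : List (List String)) : Bool :=
  let maxRows : Int := (grid.length : Int) - 1
  let maxCols : Int := ((PySem.List.pyGetD grid 0 []).length : Int) - 1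
  let around := (PySem.List.pyRange (-1) 2 1).flatMap (fun nr =>
    (PySem.List.pyRange (-1) 2 1).map (fun nc => (row + nr, col + nc)))
  let count : Int := around.foldl (fun count p =>
    if (p.1 = row ∧ p.2 = col) ∨ p.2 < 0 ∨ p.2 > maxCols ∨ p.1 < 0 ∨ p.1 > maxRows then
      count
    else if PySem.List.pyGetD (PySem.List.pyGetD grid p.1 []) p.2 "" = "@" then count + 1
    else count) 0
  count < 4

-- ===== PORT B =====
-- literal port of B; Python's clamping row slices are PySem.List.slice; grid[row][col] via pyGetD,
-- exact on Pre_ (the center read is in range there)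
def scan_around_alt (row : Int) (col : Int) (grid : List (List String)) : Bool :=
  let rows : Int := (grid.length : Int)
  let cols : Int := ((PySem.List.pyGetD grid 0 []).length : Int)
  let r0 : Int := max 0 (row - 1)
  let r1 : Int := min (rows - 1) (row + 1)
  let c0 : Int := max 0 (col - 1)
  let c1 : Int := min (cols - 1) (col + 1)
  let total : Int :=
    if c0 ≤ c1 then
      (PySem.List.pyRange r0 (r1 + 1) 1).foldl (fun t ri =>
        t + ((PySem.List.slice (PySem.List.pyGetD grid ri []) (some c0) (some (c1 + 1))).count "@" : Int)) 0
    else 0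
  let total : Int :=
    if 0 ≤ row ∧ row < rows ∧ 0 ≤ col ∧ col < cols ∧
        PySem.List.pyGetD (PySem.List.pyGetD grid row []) col "" = "@" then total - 1
    else total
  total < 4

-- ===== PRECONDITION & SPEC =====
-- Pre_ excludes the empty grid (A raises IndexError on grid[0]) and ragged grids whose rows inside the
-- 3×3 window around (row, col) are shorter than grid[0]: on those A either raises IndexError itself or —
-- when only the (never read by A) center cell is missing — B's own read of the center raises IndexError.
def Pre_scan_around (row : Int) (col : Int) (grid : List (List String)) : Prop :=
  grid ≠ [] ∧
  ∀ nr ∈ [row - 1, row, row + 1], 0 ≤ nr → nr < (grid.length : Int) →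
    ∀ nc ∈ [col - 1, col, col + 1], 0 ≤ nc → nc < ((grid.headD []).length : Int) →
      nc < ((grid.getD nr.toNat []).length : Int)
instance (row : Int) (col : Int) (grid : List (List String)) : Decidable (Pre_scan_around row col grid) := by
  unfold Pre_scan_around; infer_instance

def pvWitness_scan_around : Int × Int × List (List String) :=
  (1, 1, [["@", ".", "@"], [".", "@", "."], ["@", ".", "."]])

def Spec_scan_around (row : Int) (col : Int) (grid : List (List String)) (out : Bool) : Prop := out = scan_around_alt row col grid
instance (row : Int) (col : Int) (grid : List (List String)) (out : Bool) : Decidable (Spec_scan_around row col grid out) := by unfold Spec_scan_around; infer_instance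

-- ===== CLAIM (what is proved, stated in full; the proofs are below) =====
def Claim_equal_scan_around : Prop := ∀ (row : Int) (col : Int) (grid : List (List String)), Dom_scan_around row col grid → Pre_scan_around row col grid → Spec_scan_around row col grid (scan_around row col grid)

-- ===== LEMMAS AND PROOFS =====

-- per-cell indicator shared by both counting arguments: 1 iff (nr, nc) is in bounds and holds "@"
def pvG (grid : List (List String)) (nr nc : Int) : Int :=
  if 0 ≤ nr ∧ nr < (grid.length : Int) ∧ 0 ≤ nc ∧ nc < ((PySem.List.pyGetD grid 0 []).length : Int) ∧
      PySem.List.pyGetD (PySem.List.pyGetD grid nr []) nc "" = "@" then 1 else 0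

-- indicator sum over one window row
def pvF (grid : List (List String)) (col nr : Int) : Int :=
  pvG grid nr (col - 1) + pvG grid nr col + pvG grid nr (col + 1)

-- the common value both programs compute before comparing with 4
def pvS (row col : Int) (grid : List (List String)) : Int :=
  pvF grid col (row - 1) + pvF grid col row + pvF grid col (row + 1) - pvG grid row col

-- A's per-neighbor contribution, as a function of the (absolute) coordinate pair
def pvH (row col : Int) (grid : List (List String)) (p : Int × Int) : Int :=
  if (p.1 = row ∧ p.2 = col) ∨ p.2 < 0 ∨ p.2 > ((PySem.List.pyGetD grid 0 []).length : Int) - 1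
      ∨ p.1 < 0 ∨ p.1 > (grid.length : Int) - 1 then 0
  else if PySem.List.pyGetD (PySem.List.pyGetD grid p.1 []) p.2 "" = "@" then 1 else 0

-- a clamped-window sum collapses to the three candidate values when f vanishes outside [0, hi]
theorem pv_sum3 (a hi : Int) (f : Int → Int)
    (hf : ∀ x, ¬(0 ≤ x ∧ x ≤ hi) → f x = 0) :
    ((PySem.List.pyRange (max 0 (a - 1)) (min hi (a + 1) + 1) 1).map f).sum
      = f (a - 1) + f a + f (a + 1) := by
  by_cases hemp : min hi (a + 1) + 1 ≤ max 0 (a - 1)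
  · rw [PySem.List.pyRange_one_eq_nil hemp]
    rw [hf (a - 1) (by omega), hf a (by omega), hf (a + 1) (by omega)]
    simp
  · have hconc : PySem.List.pyRange (a - 1) (a + 2) 1 = [a - 1, a, a + 1] := by
      rw [PySem.List.pyRange_one_cons (by omega), PySem.List.pyRange_one_cons (by omega),
        PySem.List.pyRange_one_cons (by omega), PySem.List.pyRange_one_eq_nil (by omega)]
      norm_num
    have hsplit : PySem.List.pyRange (a - 1) (a + 2) 1
        = PySem.List.pyRange (a - 1) (max 0 (a - 1)) 1
          ++ PySem.List.pyRange (max 0 (a - 1)) (min hi (a + 1) + 1) 1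
          ++ PySem.List.pyRange (min hi (a + 1) + 1) (a + 2) 1 := by
      rw [← PySem.List.pyRange_one_append (a - 1) (max 0 (a - 1)) (min hi (a + 1) + 1) (by omega) (by omega),
        ← PySem.List.pyRange_one_append (a - 1) (min hi (a + 1) + 1) (a + 2) (by omega) (by omega)]
    have z1 : ((PySem.List.pyRange (a - 1) (max 0 (a - 1)) 1).map f).sum = 0 := by
      apply List.sum_eq_zero
      intro x hx
      obtain ⟨y, hy, rfl⟩ := List.mem_map.mp hx
      rw [PySem.List.mem_pyRange_one] at hy
      exact hf y (by omega)
    have z2 : ((PySem.List.pyRange (min hi (a + 1) + 1) (a + 2) 1).map f).sum = 0 := by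
      apply List.sum_eq_zero
      intro x hx
      obtain ⟨y, hy, rfl⟩ := List.mem_map.mp hx
      rw [PySem.List.mem_pyRange_one] at hy
      exact hf y (by omega)
    have e2 := congrArg (fun l => (l.map f).sum) hsplit
    rw [hconc] at e2
    simp only [List.map_append, List.sum_append, z1, z2, List.map_cons, List.map_nil,
      List.sum_cons, List.sum_nil] at e2
    omega

-- a slice with in-range bounds is the map of pyGetD over the index range
theorem pv_seg (xs : List String) (a b : Int) (h0 : 0 ≤ a) (hab : a ≤ b) (hb : b ≤ (xs.length : Int)) :
    PySem.List.slice xs (some a) (some b)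
      = (PySem.List.pyRange a b 1).map (fun j => PySem.List.pyGetD xs j "") := by
  rw [PySem.List.slice_toNat xs h0 (by omega)]
  apply List.ext_getElem
  · rw [List.length_take, List.length_drop, List.length_map, PySem.List.length_pyRange_one]
    omega
  · intro i h1 h2
    simp only [List.length_take, List.length_drop, List.length_map,
      PySem.List.length_pyRange_one] at h1 h2
    rw [List.getElem_take, List.getElem_drop]
    rw [List.getElem_map, PySem.List.getElem_pyRange_one]
    rw [PySem.List.pyGetD_eq_getElem xs "" (by omega) (by omega)]
    congr 1
    omega

-- count as an integer 0/1 sum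
theorem pv_count_sum (l : List String) :
    ((l.count "@" : Nat) : Int) = (l.map (fun x => if x = "@" then (1:Int) else 0)).sum := by
  induction l with
  | nil => simp
  | cons x l ih =>
    by_cases hx : x = "@" <;> simp [hx, ih]
    ring

theorem pvG_zero_col (grid : List (List String)) (nr nc : Int)
    (h : ¬(0 ≤ nc ∧ nc ≤ ((PySem.List.pyGetD grid 0 []).length : Int) - 1)) :
    pvG grid nr nc = 0 := by
  unfold pvG
  rw [if_neg]
  rintro ⟨-, -, h3, h4, -⟩
  exact h ⟨h3, by omega⟩

theorem pvG_zero_row (grid : List (List String)) (nr nc : Int)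
    (h : ¬(0 ≤ nr ∧ nr ≤ (grid.length : Int) - 1)) :
    pvG grid nr nc = 0 := by
  unfold pvG
  rw [if_neg]
  rintro ⟨h1, h2, -, -, -⟩
  exact h ⟨h1, by omega⟩

theorem pvF_zero_row (grid : List (List String)) (col nr : Int)
    (h : ¬(0 ≤ nr ∧ nr ≤ (grid.length : Int) - 1)) :
    pvF grid col nr = 0 := by
  unfold pvF
  rw [pvG_zero_row grid nr _ h, pvG_zero_row grid nr _ h, pvG_zero_row grid nr _ h]
  norm_num

theorem pvH_ne (row col : Int) (grid : List (List String)) (nr nc : Int)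
    (h : ¬(nr = row ∧ nc = col)) : pvH row col grid (nr, nc) = pvG grid nr nc := by
  unfold pvH pvG
  by_cases hc : (nr = row ∧ nc = col) ∨ nc < 0 ∨ nc > ((PySem.List.pyGetD grid 0 []).length : Int) - 1
      ∨ nr < 0 ∨ nr > (grid.length : Int) - 1
  · rw [if_pos hc, if_neg]
    rintro ⟨b1, b2, b3, b4, -⟩
    rcases hc with hc | hc | hc | hc | hc
    · exact h hc
    all_goals omega
  · rw [if_neg hc]
    push Not at hc
    obtain ⟨-, h1, h2, h3, h4⟩ := hc
    by_cases hcell : PySem.List.pyGetD (PySem.List.pyGetD grid nr []) nc "" = "@"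
    · rw [if_pos hcell, if_pos ⟨by omega, by omega, by omega, by omega, hcell⟩]
    · rw [if_neg hcell, if_neg (by rintro ⟨-, -, -, -, hc'⟩; exact hcell hc')]

theorem pvH_center (row col : Int) (grid : List (List String)) :
    pvH row col grid (row, col) = 0 := by
  simp [pvH]

-- A computes decide (pvS < 4)
theorem pvA_eq (row col : Int) (grid : List (List String)) :
    scan_around row col grid = decide (pvS row col grid < 4) := by
  have hr : PySem.List.pyRange (-1) 2 1 = [-1, 0, 1] := by decide
  have hbody : (fun (c : Int) (p : Int × Int) =>
      if (p.1 = row ∧ p.2 = col) ∨ p.2 < 0 ∨ p.2 > ((PySem.List.pyGetD grid 0 []).length : Int) - 1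
          ∨ p.1 < 0 ∨ p.1 > (grid.length : Int) - 1 then c
      else if PySem.List.pyGetD (PySem.List.pyGetD grid p.1 []) p.2 "" = "@" then c + 1
      else c)
      = (fun (c : Int) (p : Int × Int) => c + pvH row col grid p) := by
    funext c p
    unfold pvH
    split_ifs <;> ring
  unfold scan_around
  rw [hr]
  simp only [List.flatMap_cons, List.map_cons, List.map_nil, List.flatMap_nil, List.append_nil,
    List.cons_append, List.nil_append]
  rw [hbody, PySem.List.foldl_add]
  have hmid : pvH row col grid (row + 0, col + 0) = 0 := by
    simpa using pvH_center row col grid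
  simp only [List.map_cons, List.map_nil, List.sum_cons, List.sum_nil, hmid]
  rw [pvH_ne row col grid (row + -1) (col + -1) (by omega), pvH_ne row col grid (row + -1) (col + 0) (by omega),
    pvH_ne row col grid (row + -1) (col + 1) (by omega), pvH_ne row col grid (row + 0) (col + -1) (by omega),
    pvH_ne row col grid (row + 0) (col + 1) (by omega), pvH_ne row col grid (row + 1) (col + -1) (by omega),
    pvH_ne row col grid (row + 1) (col + 0) (by omega), pvH_ne row col grid (row + 1) (col + 1) (by omega)]
  congr 1
  unfold pvS pvF
  have e1 : row + -1 = row - 1 := by ring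
  have e2 : col + -1 = col - 1 := by ring
  have e3 : row + 0 = row := by ring
  have e4 : col + 0 = col := by ring
  rw [e1, e2, e3, e4]
  apply propext
  constructor <;> intro h <;> omega

-- one window row of B: the slice count is the indicator sum pvF
theorem pv_rowcount (grid : List (List String)) (col ri : Int)
    (hri0 : 0 ≤ ri) (hriR : ri < (grid.length : Int))
    (hlen : min (((PySem.List.pyGetD grid 0 []).length : Int) - 1) (col + 1) + 1
              ≤ ((PySem.List.pyGetD grid ri []).length : Int))
    (hc : max 0 (col - 1) ≤ min (((PySem.List.pyGetD grid 0 []).length : Int) - 1) (col + 1)) :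
    ((PySem.List.slice (PySem.List.pyGetD grid ri [])
        (some (max 0 (col - 1)))
        (some (min (((PySem.List.pyGetD grid 0 []).length : Int) - 1) (col + 1) + 1))).count "@" : Int)
      = pvF grid col ri := by
  rw [pv_seg _ _ _ (by omega) (by omega) hlen]
  rw [pv_count_sum, List.map_map]
  have hcong : ((PySem.List.pyRange (max 0 (col - 1))
        (min (((PySem.List.pyGetD grid 0 []).length : Int) - 1) (col + 1) + 1) 1).map
        ((fun x => if x = "@" then (1:Int) else 0) ∘ (fun j => PySem.List.pyGetD (PySem.List.pyGetD grid ri []) j "")))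
      = ((PySem.List.pyRange (max 0 (col - 1))
        (min (((PySem.List.pyGetD grid 0 []).length : Int) - 1) (col + 1) + 1) 1).map (fun nc => pvG grid ri nc)) := by
    apply List.map_congr_left
    intro j hj
    rw [PySem.List.mem_pyRange_one] at hj
    simp only [Function.comp]
    unfold pvG
    by_cases hcell : PySem.List.pyGetD (PySem.List.pyGetD grid ri []) j "" = "@"
    · rw [if_pos hcell, if_pos ⟨hri0, hriR, by omega, by omega, hcell⟩]
    · rw [if_neg hcell, if_neg (by rintro ⟨-, -, -, -, hx⟩; exact hcell hx)]
  rw [hcong]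
  rw [pv_sum3 col (((PySem.List.pyGetD grid 0 []).length : Int) - 1) (fun nc => pvG grid ri nc)
    (fun x hx => pvG_zero_col grid ri x hx)]
  rfl

-- B computes decide (pvS < 4) on Pre_
theorem pvB_eq (row col : Int) (grid : List (List String)) (hgne : grid ≠ [])
    (hrag : ∀ nr ∈ [row - 1, row, row + 1], 0 ≤ nr → nr < (grid.length : Int) →
      ∀ nc ∈ [col - 1, col, col + 1], 0 ≤ nc → nc < ((grid.headD []).length : Int) →
        nc < ((grid.getD nr.toNat []).length : Int)) :
    scan_around_alt row col grid = decide (pvS row col grid < 4) := by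
  have hhead : grid.headD [] = PySem.List.pyGetD grid 0 [] := by
    cases grid with
    | nil => exact absurd rfl hgne
    | cons x l => simp [PySem.List.pyGetD_zero_cons]
  have hgetD : ∀ ri : Int, 0 ≤ ri → grid.getD ri.toNat [] = PySem.List.pyGetD grid ri [] := by
    intro ri h
    rw [PySem.List.pyGetD_of_nonneg grid [] h]
  unfold scan_around_alt
  dsimp only
  have hT0 : (if max 0 (col - 1) ≤ min (((PySem.List.pyGetD grid 0 []).length : Int) - 1) (col + 1) then
      (PySem.List.pyRange (max 0 (row - 1)) (min ((grid.length : Int) - 1) (row + 1) + 1) 1).foldl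
        (fun t ri => t + ((PySem.List.slice (PySem.List.pyGetD grid ri [])
          (some (max 0 (col - 1)))
          (some (min (((PySem.List.pyGetD grid 0 []).length : Int) - 1) (col + 1) + 1))).count "@" : Int)) 0
    else 0) = pvF grid col (row - 1) + pvF grid col row + pvF grid col (row + 1) := by
    by_cases hc : max 0 (col - 1) ≤ min (((PySem.List.pyGetD grid 0 []).length : Int) - 1) (col + 1)
    · rw [if_pos hc, PySem.List.foldl_add]
      rw [List.map_congr_left (fun ri hri => ?_)]
      · rw [pv_sum3 row ((grid.length : Int) - 1) (pvF grid col) (fun x hx => pvF_zero_row grid col x hx)]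
        ring
      · rw [PySem.List.mem_pyRange_one] at hri
        have hri0 : 0 ≤ ri := by omega
        have hriR : ri < (grid.length : Int) := by omega
        have hri3 : ri = row - 1 ∨ ri = row ∨ ri = row + 1 := by omega
        have hc13 : min (((PySem.List.pyGetD grid 0 []).length : Int) - 1) (col + 1) = col - 1
            ∨ min (((PySem.List.pyGetD grid 0 []).length : Int) - 1) (col + 1) = col
            ∨ min (((PySem.List.pyGetD grid 0 []).length : Int) - 1) (col + 1) = col + 1 := by omega
        have hlen : min (((PySem.List.pyGetD grid 0 []).length : Int) - 1) (col + 1) + 1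
            ≤ ((PySem.List.pyGetD grid ri []).length : Int) := by
          have := hrag ri (by rcases hri3 with h | h | h <;> simp [h]) hri0 hriR
            (min (((PySem.List.pyGetD grid 0 []).length : Int) - 1) (col + 1))
            (by rcases hc13 with h | h | h <;> rw [h] <;> simp)
            (by omega) (by rw [hhead]; omega)
          rw [hgetD ri hri0] at this
          omega
        exact pv_rowcount grid col ri hri0 hriR hlen hc
    · rw [if_neg hc]
      have hz : ∀ nr : Int, pvF grid col nr = 0 := by
        intro nr
        unfold pvF
        rw [pvG_zero_col grid nr _ (by omega), pvG_zero_col grid nr _ (by omega),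
          pvG_zero_col grid nr _ (by omega)]
        norm_num
      rw [hz, hz, hz]
      norm_num
  rw [hT0]
  by_cases hcent : 0 ≤ row ∧ row < (grid.length : Int) ∧ 0 ≤ col ∧
      col < ((PySem.List.pyGetD grid 0 []).length : Int) ∧
      PySem.List.pyGetD (PySem.List.pyGetD grid row []) col "" = "@"
  · rw [if_pos hcent]
    unfold pvS
    rw [show pvG grid row col = 1 from by unfold pvG; rw [if_pos hcent]]
  · rw [if_neg hcent]
    unfold pvS
    rw [show pvG grid row col = 0 from by unfold pvG; rw [if_neg hcent]]
    norm_num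

-- ===== VERDICT (by name: the statement is the Claim_ definition above) =====
theorem scan_around_spec : Claim_equal_scan_around := by
  intro row col grid _ hpre
  obtain ⟨hgne, hrag⟩ := hpre
  unfold Spec_scan_around
  rw [pvA_eq row col grid, pvB_eq row col grid hgne hrag]
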